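-- pv_equiv track=rewrite | github.com/willienel/advent-of-code-2015 | day5/part1/get_nice_string_count.py | get_nice_string_count
-- ===== SOURCE A (Python) =====
-- def get_nice_string_count(strings):
--
--     nice_strings = set()
--
--     vowels = ["a", "e", "i", "o", "u"]
--     naughty_strings = ["ab", "cd", "pq", "xy"]
--
--     for string in strings:
--
--         string_vowels = []
--         string_consecutive_letters = []
--         string_naughty_words = []
--
--         string = string.strip()
--         string_length = len(string)
--
--         for i in range(string_length):
--
--             first_character = string[i]
--             second_character = string[i + 1] if i < string_length - 1 else ""
--
--             combined_characters = f"{first_character}{second_character}"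
--
--             if combined_characters in naughty_strings:
--                 string_naughty_words.append(combined_characters)
--
--             if first_character in vowels:
--                 string_vowels.append(first_character)
--
--             if first_character == second_character:
--                 string_consecutive_letters.append(combined_characters)
--
--         if len(string_naughty_words) == 0:
--             if len(string_vowels) >= 3 and len(string_consecutive_letters) >= 1:
--                 nice_strings.add(string)
--
--     return len(nice_strings)
-- ===== SOURCE B (Python) =====
-- def get_nice_string_count(strings):
--     nice = set()
--     for string in strings:
--         s = string.strip()
--         # run-length encode s into (char, count) runs, built back-to-front
--         runs = []
--         for c in reversed(s):
--             if runs and runs[0][0] == c: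
--                 runs[0] = (c, runs[0][1] + 1)
--             else:
--                 runs.insert(0, (c, 1))
--         vowels = sum(n for c, n in runs if c in "aeiou")
--         has_double = any(n >= 2 for _, n in runs)
--         has_naughty = any(a + b in ("ab", "cd", "pq", "xy")
--                           for (a, _), (b, _) in zip(runs, runs[1:]))
--         if vowels >= 3 and has_double and not has_naughty:
--             nice.add(s)
--     return len(nice)
-- ===== Notes on version B (the rewrite author's own statement) =====
-- stated objective: alternative
-- what changed: B first run-length encodes each stripped string into (char,count) runs and evaluates all three niceness rules on the runs (vowel total = sum of vowel-run lengths, double letter = a run of length >= 2, naughty pair = a run boundary whose two chars form ab/cd/pq/xy), instead of A's per-character index walk that builds three lists.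
import Mathlib
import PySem

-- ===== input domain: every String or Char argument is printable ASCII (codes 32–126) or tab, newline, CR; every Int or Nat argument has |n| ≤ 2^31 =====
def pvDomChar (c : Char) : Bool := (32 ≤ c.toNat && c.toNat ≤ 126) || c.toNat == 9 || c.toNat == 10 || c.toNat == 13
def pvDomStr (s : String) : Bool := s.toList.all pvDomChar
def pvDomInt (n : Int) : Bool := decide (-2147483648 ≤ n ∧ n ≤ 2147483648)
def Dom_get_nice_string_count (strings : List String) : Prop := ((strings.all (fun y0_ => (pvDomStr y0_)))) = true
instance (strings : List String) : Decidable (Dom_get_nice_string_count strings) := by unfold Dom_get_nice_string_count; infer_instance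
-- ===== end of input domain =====

-- B evaluates the niceness rules on a run-length encoding of each string instead of A's fused per-character walk (objective: alternative); return value only.

-- ===== PORT A =====
-- A's inner index loop, transliterated as structural recursion over the characters of the stripped
-- string: first_character = string[i]; second_character = string[i+1] if i < len-1 else "" (the empty
-- string / a 1-char string is a Char list here); combined = first + second; the three appends become
-- the three components of the state, kept in iteration order.
def pvAScan : List Char → List (List Char) × List Char × List (List Char)
  | [] => ([], [], [])
  | c :: rest =>
    let second : List Char := match rest with | [] => [] | d :: _ => [d]
    let combined : List Char := c :: second
    let r := pvAScan rest
    ((if combined ∈ [['a','b'],['c','d'],['p','q'],['x','y']] then [combined] else []) ++ r.1,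
     (if c ∈ ['a','e','i','o','u'] then [c] else []) ++ r.2.1,
     (if [c] = second then [combined] else []) ++ r.2.2)

def get_nice_string_count (strings : List String) : Int :=
  ((strings.foldl (fun nice_strings string =>
    let st := PySem.Str.strip string
    let r := pvAScan st.toList
    if r.1.length = 0 then
      if 3 ≤ r.2.1.length ∧ 1 ≤ r.2.2.length then PySem.Set.add nice_strings st else nice_strings
    else nice_strings) PySem.Set.empty).length : Int)

-- ===== PORT B =====
-- Source B's run-length encoder: the loop over reversed(s) that prepends a fresh run or bumps the
-- first run's count is a foldr over the characters (same state, same branch order).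
def pvRuns (cs : List Char) : List (Char × Nat) :=
  cs.foldr (fun c runs =>
    match runs with
    | [] => [(c, 1)]
    | (d, n) :: rs => if c = d then (c, n + 1) :: rs else (c, 1) :: (d, n) :: rs) []

-- a+b in ("ab","cd","pq","xy") ported as membership of the two-char list in the char-pair list.
def pvBNice (s : String) : Bool :=
  let runs := pvRuns s.toList
  let vowels := ((runs.filter (fun r => "aeiou".toList.contains r.1)).map Prod.snd).sum
  let has_double := runs.any (fun r => 2 ≤ r.2)
  let has_naughty := (runs.zip runs.tail).any
    (fun p => [p.1.1, p.2.1] ∈ [['a','b'],['c','d'],['p','q'],['x','y']])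
  decide (3 ≤ vowels) && has_double && !has_naughty

def get_nice_string_count_alt (strings : List String) : Int :=
  ((strings.foldl (fun nice string =>
    let s := PySem.Str.strip string
    if pvBNice s then PySem.Set.add nice s else nice) PySem.Set.empty).length : Int)

-- ===== PRECONDITION & SPEC =====
def Spec_get_nice_string_count (strings : List String) (out : Int) : Prop := out = get_nice_string_count_alt strings
instance (strings : List String) (out : Int) : Decidable (Spec_get_nice_string_count strings out) := by unfold Spec_get_nice_string_count; infer_instance

-- ===== CLAIM (what is proved, stated in full; the proofs are below) =====
def Claim_equal_get_nice_string_count : Prop := ∀ (strings : List String), Dom_get_nice_string_count strings → Spec_get_nice_string_count strings (get_nice_string_count strings)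

-- ===== LEMMAS AND PROOFS =====

-- A's scan characterised: naughty hits and double hits are filters of the adjacent-pair list,
-- the vowels a filter of the characters.
theorem pvAScan_eq (cs : List Char) :
    pvAScan cs =
      (((cs.zip cs.tail).filter (fun p => decide ([p.1, p.2] ∈ [['a','b'],['c','d'],['p','q'],['x','y']]))).map (fun p => [p.1, p.2]),
       cs.filter (fun c => decide (c ∈ ['a','e','i','o','u'])),
       ((cs.zip cs.tail).filter (fun p => p.1 == p.2)).map (fun p => [p.1, p.2])) := by
  induction cs with
  | nil => rfl
  | cons c rest ih =>
    cases rest with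
    | nil =>
      refine Prod.ext ?_ (Prod.ext ?_ ?_) <;> simp [pvAScan, List.filter_cons]
    | cons d t =>
      rw [pvAScan.eq_def]
      dsimp only []
      rw [ih]
      refine Prod.ext ?_ (Prod.ext ?_ ?_) <;> simp only [List.tail_cons, List.zip_cons_cons, List.filter_cons]
      · by_cases h : [c, d] ∈ [['a','b'],['c','d'],['p','q'],['x','y']] <;> simp [h]
      · by_cases h : c ∈ ['a','e','i','o','u'] <;> simp_all [List.filter_cons]
      · by_cases h : c = d <;> simp [h]

-- unfolding rule for the foldr
theorem pvRuns_cons (c : Char) (cs : List Char) :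
    pvRuns (c :: cs) =
      match pvRuns cs with
      | [] => [(c, 1)]
      | (d, n) :: rs => if c = d then (c, n + 1) :: rs else (c, 1) :: (d, n) :: rs := by
  simp [pvRuns]

-- the head run of a nonempty string carries its first character, with a positive count
theorem pvRuns_head (c : Char) (cs : List Char) :
    ∃ n rs, pvRuns (c :: cs) = (c, n) :: rs ∧ 1 ≤ n := by
  rw [pvRuns_cons]
  cases h : pvRuns cs with
  | nil => exact ⟨1, [], rfl, le_refl 1⟩
  | cons p rs =>
    obtain ⟨d, n⟩ := p
    by_cases hc : c = d
    · exact ⟨n + 1, rs, by simp [hc], by omega⟩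
    · exact ⟨1, (d, n) :: rs, by simp [hc], le_refl 1⟩

-- (1) vowel total over runs = vowel count over characters
theorem pvRuns_vowels (cs : List Char) :
    (((pvRuns cs).filter (fun r => "aeiou".toList.contains r.1)).map Prod.snd).sum
      = (cs.filter (fun c => decide (c ∈ ['a','e','i','o','u']))).length := by
  have hp : ∀ c : Char, ("aeiou".toList.contains c) = decide (c ∈ ['a','e','i','o','u']) := by
    intro c
    show (['a','e','i','o','u'].contains c) = _
    by_cases h : c ∈ ['a','e','i','o','u'] <;> simp [h]
  induction cs with
  | nil => rfl
  | cons c rest ih =>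
    rw [pvRuns_cons]
    cases h : pvRuns rest with
    | nil =>
      have hrest : rest = [] := by
        cases rest with
        | nil => rfl
        | cons d t => obtain ⟨n, rs, he, -⟩ := pvRuns_head d t; rw [he] at h; cases h
      subst hrest
      dsimp only
      simp only [List.filter_cons, List.filter_nil, hp]
      by_cases hv : c ∈ ['a','e','i','o','u'] <;> simp [hv]
    | cons p rs =>
      obtain ⟨d, n⟩ := p
      rw [h] at ih
      dsimp only
      by_cases hc : c = d
      · subst hc
        rw [if_pos rfl]
        simp only [List.filter_cons, hp] at ih ⊢
        by_cases hv : decide (c ∈ ['a','e','i','o','u']) = true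
        · simp only [if_pos hv, List.map_cons, List.sum_cons, List.length_cons] at ih ⊢
          omega
        · simp only [if_neg hv] at ih ⊢
          omega
      · rw [if_neg hc]
        simp only [List.filter_cons, hp] at ih ⊢
        by_cases hv : decide (c ∈ ['a','e','i','o','u']) = true
        · simp only [if_pos hv, List.map_cons, List.sum_cons, List.length_cons]
          omega
        · simp only [if_neg hv]
          omega

-- (2) a run of length ≥ 2 ⇔ two equal adjacent characters
theorem pvRuns_double (cs : List Char) :
    (pvRuns cs).any (fun r => 2 ≤ r.2)
      = !((cs.zip cs.tail).filter (fun p => p.1 == p.2)).isEmpty := by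
  induction cs with
  | nil => rfl
  | cons c rest ih =>
    cases rest with
    | nil => simp [pvRuns]
    | cons d t =>
      obtain ⟨n, rs, he, hn⟩ := pvRuns_head d t
      rw [pvRuns_cons, he]
      rw [he] at ih
      dsimp only
      by_cases hc : c = d
      · rw [if_pos hc]
        simp only [List.tail_cons, List.zip_cons_cons, List.filter_cons, hc]
        simp [show 2 ≤ n + 1 by omega]
      · rw [if_neg hc]
        simp only [List.tail_cons, List.zip_cons_cons, List.filter_cons] at ih ⊢
        simp [hc, ih]

-- membership in the naughty list forces the two characters to differ
theorem naughty_ne {x y : Char} (h : [x, y] ∈ [['a','b'],['c','d'],['p','q'],['x','y']]) : x ≠ y := by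
  fin_cases h <;> decide

-- (3) a naughty pair of adjacent run characters ⇔ a naughty pair of adjacent characters
theorem pvRuns_naughty (cs : List Char) :
    ((pvRuns cs).zip (pvRuns cs).tail).any
        (fun p => [p.1.1, p.2.1] ∈ [['a','b'],['c','d'],['p','q'],['x','y']])
      = !((cs.zip cs.tail).filter
          (fun p => decide ([p.1, p.2] ∈ [['a','b'],['c','d'],['p','q'],['x','y']]))).isEmpty := by
  induction cs with
  | nil => rfl
  | cons c rest ih =>
    cases rest with
    | nil => simp [pvRuns]
    | cons d t =>
      obtain ⟨n, rs, he, -⟩ := pvRuns_head d t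
      rw [pvRuns_cons, he]
      rw [he] at ih
      dsimp only
      by_cases hc : c = d
      · rw [if_pos hc]
        subst hc
        simp only [List.tail_cons, List.zip_cons_cons, List.filter_cons]
        have hno : ¬ ([c, c] ∈ [['a','b'],['c','d'],['p','q'],['x','y']]) := fun h => naughty_ne h rfl
        rw [if_neg (by simpa using hno)]
        cases rs with
        | nil => simpa using ih
        | cons q rs' =>
          obtain ⟨e, m⟩ := q
          simp only [List.tail_cons, List.zip_cons_cons, List.any_cons] at ih ⊢
          exact ih
      · rw [if_neg hc]
        simp only [List.tail_cons, List.zip_cons_cons, List.any_cons] at ih ⊢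
        rw [List.filter_cons]
        by_cases hn : decide ([c, d] ∈ [['a','b'],['c','d'],['p','q'],['x','y']]) = true
        · rw [if_pos hn]
          simp only [hn, Bool.true_or, List.isEmpty_cons, Bool.not_false]
        · rw [if_neg hn]
          simp only [Bool.not_eq_true] at hn
          simp only [hn, Bool.false_or]
          exact ih

-- the two per-string conditions agree
theorem nice_cond_eq (st : String) :
    ((pvAScan st.toList).1.length = 0 ∧
      3 ≤ (pvAScan st.toList).2.1.length ∧ 1 ≤ (pvAScan st.toList).2.2.length) ↔
    pvBNice st = true := by
  rw [pvAScan_eq]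
  simp only [pvBNice, Bool.and_eq_true, decide_eq_true_eq,
    List.length_map, List.length_eq_zero_iff]
  rw [pvRuns_vowels, pvRuns_double, pvRuns_naughty]
  simp only [Bool.not_eq_true', Bool.not_eq_false', List.isEmpty_iff, List.isEmpty_eq_false_iff]
  constructor
  · rintro ⟨h1, h2, h3⟩
    exact ⟨⟨h2, List.length_pos_iff.mp (by omega)⟩, h1⟩
  · rintro ⟨⟨h2, h3⟩, h1⟩
    exact ⟨h1, h2, by have := List.length_pos_iff.mpr h3; omega⟩

-- ===== VERDICT (by name: the statement is the Claim_ definition above) =====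
theorem get_nice_string_count_spec : Claim_equal_get_nice_string_count := by
  intro strings _
  unfold Spec_get_nice_string_count get_nice_string_count get_nice_string_count_alt
  refine congrArg (fun l : List String => ((l.length : Nat) : Int)) (PySem.List.foldl_congr_mem _ _ _ _ (fun acc s _ => ?_))
  show (if (pvAScan (PySem.Str.strip s).toList).1.length = 0 then
          if 3 ≤ (pvAScan (PySem.Str.strip s).toList).2.1.length ∧
              1 ≤ (pvAScan (PySem.Str.strip s).toList).2.2.length
          then PySem.Set.add acc (PySem.Str.strip s) else acc
        else acc) =
       (if pvBNice (PySem.Str.strip s) then PySem.Set.add acc (PySem.Str.strip s) else acc)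
  by_cases h : pvBNice (PySem.Str.strip s) = true
  · have hc := (nice_cond_eq (PySem.Str.strip s)).mpr h
    rw [if_pos hc.1, if_pos hc.2, h, if_pos rfl]
  · have hc := (nice_cond_eq (PySem.Str.strip s)).not.mpr h
    simp only [Bool.not_eq_true] at h
    rw [h, if_neg (show ¬((false : Bool) = true) by simp)]
    by_cases h0 : (pvAScan (PySem.Str.strip s).toList).1.length = 0
    · have hx : ¬(3 ≤ (pvAScan (PySem.Str.strip s).toList).2.1.length ∧
          1 ≤ (pvAScan (PySem.Str.strip s).toList).2.2.length) := fun hy => hc ⟨h0, hy⟩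
      rw [if_pos h0, if_neg hx]
    · rw [if_neg h0]
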